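-- pv_equiv track=rewrite | github.com/matt76k/zumo | zumo/Shanten.py | splitKind
-- ===== SOURCE A (Python) =====
-- def isWanz(n):
--     return n >= 0 and n < 9
--
-- def isPinz(n):
--     return n >= 9 and n < 18
--
-- def isSouz(n):
--     return n >= 18 and n < 27
--
-- def splitKind(hand):
--     ret = ([],[],[],[])
--     for t in hand:
--         if isWanz(t):
--             ret[0].append(t)
--         elif isPinz(t):
--             ret[1].append(t)
--         elif isSouz(t):
--             ret[2].append(t)
--         else:
--             ret[3].append(t)
--     return ret
-- ===== SOURCE B (Python) =====
-- def isWanz(n):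
--     return n >= 0 and n < 9
--
-- def isPinz(n):
--     return n >= 9 and n < 18
--
-- def isSouz(n):
--     return n >= 18 and n < 27
--
-- def splitKind(hand):
--     return ([t for t in hand if isWanz(t)],
--             [t for t in hand if isPinz(t)],
--             [t for t in hand if isSouz(t)],
--             [t for t in hand if not (isWanz(t) or isPinz(t) or isSouz(t))])
-- ===== Notes on version B (the rewrite author's own statement) =====
-- stated objective: idiomatic
-- what changed: Replaces the single stateful branching loop over a 4-tuple of mutable lists by four independent filtering list comprehensions over hand, one per tile group.
import Mathlib
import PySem

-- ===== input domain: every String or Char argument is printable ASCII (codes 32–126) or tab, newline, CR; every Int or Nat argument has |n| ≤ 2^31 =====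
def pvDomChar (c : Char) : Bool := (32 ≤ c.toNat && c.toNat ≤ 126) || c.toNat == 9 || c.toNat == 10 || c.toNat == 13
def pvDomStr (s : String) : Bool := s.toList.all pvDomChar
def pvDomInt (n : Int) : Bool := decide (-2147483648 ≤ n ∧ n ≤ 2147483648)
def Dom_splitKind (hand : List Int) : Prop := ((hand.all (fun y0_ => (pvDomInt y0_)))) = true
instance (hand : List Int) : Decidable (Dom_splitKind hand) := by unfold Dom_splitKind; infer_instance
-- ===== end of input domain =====

-- B replaces A's single branching loop over four mutable lists by four independent filters; same order, same cost.

-- ===== PORT A =====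
def isWanz (n : Int) : Bool := n ≥ 0 && n < 9
def isPinz (n : Int) : Bool := n ≥ 9 && n < 18
def isSouz (n : Int) : Bool := n ≥ 18 && n < 27

-- A: one pass, appending each tile to one of the four lists of the state.
def splitKind (hand : List Int) : List Int × List Int × List Int × List Int :=
  hand.foldl (fun ret t =>
    if isWanz t then (ret.1 ++ [t], ret.2.1, ret.2.2.1, ret.2.2.2)
    else if isPinz t then (ret.1, ret.2.1 ++ [t], ret.2.2.1, ret.2.2.2)
    else if isSouz t then (ret.1, ret.2.1, ret.2.2.1 ++ [t], ret.2.2.2)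
    else (ret.1, ret.2.1, ret.2.2.1, ret.2.2.2 ++ [t])) ([], [], [], [])

-- ===== PORT B =====
def splitKind_alt (hand : List Int) : List Int × List Int × List Int × List Int :=
  (hand.filter (fun t => isWanz t),
   hand.filter (fun t => isPinz t),
   hand.filter (fun t => isSouz t),
   hand.filter (fun t => !(isWanz t || isPinz t || isSouz t)))

-- ===== PRECONDITION & SPEC =====
def Spec_splitKind (hand : List Int) (out : List Int × List Int × List Int × List Int) : Prop := out = splitKind_alt hand
instance (hand : List Int) (out : List Int × List Int × List Int × List Int) : Decidable (Spec_splitKind hand out) := by unfold Spec_splitKind; infer_instance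

-- ===== CLAIM (what is proved, stated in full; the proofs are below) =====
def Claim_equal_splitKind : Prop := ∀ (hand : List Int), Dom_splitKind hand → Spec_splitKind hand (splitKind hand)

-- ===== LEMMAS AND PROOFS =====
lemma splitKind_foldl_acc (hand : List Int) (a b c d : List Int) :
    hand.foldl (fun ret t =>
      if isWanz t then (ret.1 ++ [t], ret.2.1, ret.2.2.1, ret.2.2.2)
      else if isPinz t then (ret.1, ret.2.1 ++ [t], ret.2.2.1, ret.2.2.2)
      else if isSouz t then (ret.1, ret.2.1, ret.2.2.1 ++ [t], ret.2.2.2)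
      else (ret.1, ret.2.1, ret.2.2.1, ret.2.2.2 ++ [t])) (a, b, c, d)
    = (a ++ hand.filter (fun t => isWanz t),
       b ++ hand.filter (fun t => isPinz t),
       c ++ hand.filter (fun t => isSouz t),
       d ++ hand.filter (fun t => !(isWanz t || isPinz t || isSouz t))) := by
  induction hand generalizing a b c d with
  | nil => simp
  | cons x xs ih =>
    simp only [List.foldl_cons, List.filter_cons]
    by_cases hw : isWanz x
    · have hp : isPinz x = false := by simp [isWanz, isPinz] at *; omega
      have hs : isSouz x = false := by simp [isWanz, isSouz] at *; omega
      simp [hw, hp, hs, ih]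
    · by_cases hp : isPinz x
      · have : ¬ isSouz x := by simp [isPinz, isSouz] at *; omega
        simp [hw, hp, this, ih]
      · by_cases hs : isSouz x
        · simp [hw, hp, hs, ih]
        · simp [hw, hp, hs, ih]

-- ===== VERDICT (by name: the statement is the Claim_ definition above) =====
theorem splitKind_spec : Claim_equal_splitKind := by
  intro hand _
  unfold Spec_splitKind splitKind splitKind_alt
  rw [splitKind_foldl_acc]
  simp
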